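-- pv_equiv track=rewrite | github.com/skrendaskrenduolis/aoc-of-code-2022 | day5/aoc_5.py | transpose_reverse
-- ===== SOURCE A (Python) =====
-- def transpose_reverse(matrix):
--     result_matrix = []
--     transposed = [[matrix[j][i]
--                    for j in range(len(matrix))] for i in range(len(matrix[0]))]
--     for row in transposed:
--         no_gaps = [item for item in row if item != '   ']
--         no_gaps.reverse()
--         result_matrix.append(no_gaps)
--     return result_matrix
-- ===== SOURCE B (Python) =====
-- def transpose_reverse(matrix):
--     width = len(matrix[0])
--     buckets = [[] for _ in range(width)]
--     for row in reversed(matrix):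
--         for i in range(width):
--             if row[i] != '   ':
--                 buckets[i].append(row[i])
--     return buckets
-- ===== Notes on version B (the rewrite author's own statement) =====
-- stated objective: alternative
-- what changed: A traverses column-major, materialising a transposed matrix and then filtering and in-place reversing each row; B never transposes: it makes one row-major pass over reversed(matrix), maintaining one bucket per output column and appending each non-gap cell, so the reversal falls out of the bottom-up traversal and no intermediate matrix or reverse step exists.
import Mathlib
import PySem

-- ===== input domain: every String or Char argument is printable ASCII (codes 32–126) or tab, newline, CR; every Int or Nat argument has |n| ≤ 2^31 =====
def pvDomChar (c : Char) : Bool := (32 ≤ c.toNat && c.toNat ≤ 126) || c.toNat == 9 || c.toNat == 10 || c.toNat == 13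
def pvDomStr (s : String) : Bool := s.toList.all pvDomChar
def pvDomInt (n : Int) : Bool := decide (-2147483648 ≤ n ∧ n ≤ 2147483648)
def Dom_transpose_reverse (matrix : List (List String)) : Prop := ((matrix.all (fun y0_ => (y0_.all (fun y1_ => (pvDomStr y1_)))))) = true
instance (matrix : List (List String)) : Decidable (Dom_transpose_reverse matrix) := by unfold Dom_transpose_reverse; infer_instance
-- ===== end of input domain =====

-- B replaces transpose-then-filter-then-reverse by one row-major bottom-up pass that appends each non-gap cell to its column bucket (objective: alternative decomposition); return values proved equal on Pre_.


-- ===== PORT A =====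
-- matrix[j][i] is ported with getD ""; Pre_ guarantees every such access is in range.
def transpose_reverse (matrix : List (List String)) : List (List String) :=
  let transposed : List (List String) :=
    (List.range (matrix.headD []).length).map (fun i =>
      (List.range matrix.length).map (fun j => (matrix.getD j []).getD i ""))
  transposed.foldl (fun result_matrix row =>
    result_matrix ++ [(row.filter (fun item => item != "   ")).reverse]) []

-- ===== PORT B =====
-- one row-major pass over reversed(matrix): buckets[i].append(row[i]) for each non-gap cell
def transpose_reverse_alt (matrix : List (List String)) : List (List String) :=
  let width := (matrix.headD []).length
  matrix.reverse.foldl (fun buckets row =>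
    (List.range width).foldl (fun b i =>
      if (row.getD i "") != "   " then b.set i (b.getD i [] ++ [row.getD i ""]) else b)
      buckets)
    ((List.range width).map (fun _ => ([] : List String)))

-- ===== PRECONDITION & SPEC =====
-- Pre_ excludes exactly the inputs where Python A raises IndexError: the empty matrix
-- (matrix[0]) and ragged matrices with some row shorter than the first row (matrix[j][i]).
def Pre_transpose_reverse (matrix : List (List String)) : Prop :=
  matrix ≠ [] ∧ ∀ row ∈ matrix, (matrix.headD []).length ≤ row.length
instance (matrix : List (List String)) : Decidable (Pre_transpose_reverse matrix) := by
  unfold Pre_transpose_reverse; infer_instance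
def pvWitness_transpose_reverse : List (List String) := [["a", "   "], ["b", "c"]]
def Spec_transpose_reverse (matrix : List (List String)) (out : List (List String)) : Prop := out = transpose_reverse_alt matrix
instance (matrix : List (List String)) (out : List (List String)) : Decidable (Spec_transpose_reverse matrix out) := by unfold Spec_transpose_reverse; infer_instance

-- ===== CLAIM (what is proved, stated in full; the proofs are below) =====
def Claim_equal_transpose_reverse : Prop := ∀ (matrix : List (List String)), Dom_transpose_reverse matrix → Pre_transpose_reverse matrix → Spec_transpose_reverse matrix (transpose_reverse matrix)

-- ===== LEMMAS AND PROOFS =====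

theorem foldl_append_singleton {a b : Type} (l : List a) (f : a -> b) (acc : List b) :
    l.foldl (fun acc x => acc ++ [f x]) acc = acc ++ l.map f := by
  induction l generalizing acc with
  | nil => simp
  | cons x xs ih => simp [ih]

theorem getD_map_range {b : Type} (w i : Nat) (g : Nat -> b) (d : b) (h : i < w) :
    ((List.range w).map g).getD i d = g i := by
  simp [List.getD, h]

theorem set_map_range {b : Type} (w i : Nat) (v : b) (g : Nat -> b) (_h : i < w) :
    ((List.range w).map g).set i v = (List.range w).map (fun j => if j = i then v else g j) := by
  apply List.ext_getElem
  · simp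
  · intro k h1 h2
    simp only [List.length_set, List.length_map, List.length_range] at h1
    by_cases hk : i = k
    · simp [hk]
    · have hk' : ¬ k = i := fun h' => hk h'.symm
      simp [hk, hk']

-- inner loop: fold of conditional in-place appends over range w, on a map-shaped bucket list
theorem inner_spec (row : List String) :
    forall (w m : Nat) (g : Nat -> List String), w <= m ->
    (List.range w).foldl (fun b i =>
        if (row.getD i "") != "   " then b.set i (b.getD i [] ++ [row.getD i ""]) else b)
      ((List.range m).map g) =
    (List.range m).map (fun j =>
      if j < w ∧ ¬ row.getD j "" = "   " then g j ++ [row.getD j ""] else g j) := by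
  intro w
  induction w with
  | zero =>
    intro m g _
    simp
  | succ w ih =>
    intro m g hw
    rw [List.range_succ, List.foldl_append, List.foldl_cons, List.foldl_nil, ih m g (by omega)]
    by_cases hc : row.getD w "" = "   "
    · have hb : ¬ ((row.getD w "") != "   ") = true := by simpa using hc
      rw [if_neg hb]
      refine List.map_congr_left fun j hj => ?_
      by_cases hjw : j = w
      · subst hjw
        have hc2 : row[j]?.getD "" = "   " := hc
        have h2 : j < j + 1 := by omega
        simp [hc2, h2]
      · have h3 : (j < w ∧ ¬ row.getD j "" = "   ") ↔ (j < w + 1 ∧ ¬ row.getD j "" = "   ") := by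
          constructor <;> rintro ⟨ha, hb2⟩ <;> exact ⟨by omega, hb2⟩
        rw [if_congr h3 rfl rfl]
    · have hb : ((row.getD w "") != "   ") = true := by simpa using hc
      rw [if_pos hb, getD_map_range m w _ [] (by omega), set_map_range m w _ _ (by omega)]
      refine List.map_congr_left fun j hj => ?_
      by_cases hjw : j = w
      · subst hjw
        have hc2 : ¬ row[j]?.getD "" = "   " := hc
        have h2 : j < j + 1 := by omega
        simp [hc2, h2]
      · rw [if_neg hjw]
        have h3 : (j < w ∧ ¬ row.getD j "" = "   ") ↔ (j < w + 1 ∧ ¬ row.getD j "" = "   ") := by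
          constructor <;> rintro ⟨ha, hb2⟩ <;> exact ⟨by omega, hb2⟩
        rw [if_congr h3 rfl rfl]

-- invariant of B's outer fold: each bucket accumulates the kept cells of its column, in row order
theorem outer_spec (rs : List (List String)) (w : Nat) :
    forall g : Nat -> List String,
    rs.foldl (fun buckets row =>
        (List.range w).foldl (fun b i =>
          if (row.getD i "") != "   " then b.set i (b.getD i [] ++ [row.getD i ""]) else b)
          buckets)
      ((List.range w).map g) =
    (List.range w).map (fun j =>
      g j ++ (rs.map (fun row => row.getD j "")).filter (fun item => item != "   ")) := by
  induction rs with
  | nil => intro g; simp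
  | cons r rs ih =>
    intro g
    rw [List.foldl_cons, inner_spec r w w g (by omega), ih]
    refine List.map_congr_left fun j hj => ?_
    have hjw : j < w := List.mem_range.mp hj
    rw [List.map_cons, List.filter_cons]
    by_cases hc : r.getD j "" = "   "
    · have hc2 : ¬ ((r.getD j "") != "   ") = true := by simpa using hc
      rw [if_neg hc2, if_neg (fun hh => hh.2 hc)]
    · have hc2 : ((r.getD j "") != "   ") = true := by simpa using hc
      rw [if_pos hc2, if_pos ⟨hjw, hc⟩, List.append_assoc]
      rfl

theorem map_range_getD {a b : Type} (l : List a) (f : a -> b) (d : a) :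
    (List.range l.length).map (fun j => f (l.getD j d)) = l.map f := by
  induction l with
  | nil => simp
  | cons x xs ih =>
    simp only [List.length_cons, List.range_succ_eq_map, List.map_cons, List.map_map,
      Function.comp_def, List.getD_cons_zero, List.getD_cons_succ]
    exact congrArg _ ih

-- ===== VERDICT (by name: the statement is the Claim_ definition above) =====
theorem transpose_reverse_spec : Claim_equal_transpose_reverse := by
  intro matrix _ _
  unfold Spec_transpose_reverse transpose_reverse transpose_reverse_alt
  rw [foldl_append_singleton, List.map_map, outer_spec]
  have hcol : forall i : Nat, (List.range matrix.length).map (fun j => (matrix[j]?.getD [])[i]?.getD "") =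
      matrix.map (fun row => row[i]?.getD "") :=
    fun i => map_range_getD matrix (fun row => row.getD i "") []
  refine List.map_congr_left fun i _ => ?_
  simp [List.map_reverse, List.filter_reverse]
  exact congrArg (List.filter fun item => item != "   ") (hcol i)
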